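-- pv_equiv track=rewrite | github.com/chimd715/AlgorithmStudy | Programmers/level1/신고 결과 받기.py | solution
-- ===== SOURCE A (Python) =====
-- def solution(id_list: list, reports: list, k: int) -> list:
--     reported_by_id: dict = {user_id: set() for user_id in id_list}
--     mail_inbox: dict = {user_id: [] for user_id in id_list}
--
--     for report in reports:
--         reporter, reportee = report.split(" ")
--         reported_by_id[reportee].add(reporter)
--
--     for reportee, reporters in reported_by_id.items():
--         if len(reporters) < k:
--             continue
--
--         for reporter in reporters:
--             mail_inbox[reporter].append(reportee)
--
--     return [len(mails) for mails in mail_inbox.values()]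
-- ===== SOURCE B (Python) =====
-- def solution(id_list: list, reports: list, k: int) -> list:
--     pairs = {tuple(report.split(" ")) for report in reports}
--     banned = {s for _, s in pairs if sum(1 for p in pairs if p[1] == s) >= k}
--     return [sum(1 for r, s in pairs if r == u and s in banned)
--             for u in dict.fromkeys(id_list)]
-- ===== Notes on version B (the rewrite author's own statement) =====
-- stated objective: simpler
-- what changed: Replaces A's two dict/set accumulators (reportee -> set of reporters, reporter -> mail list) by one deduplicated set of (reporter, reportee) pairs with direct counting comprehensions over it.
import Mathlib
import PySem

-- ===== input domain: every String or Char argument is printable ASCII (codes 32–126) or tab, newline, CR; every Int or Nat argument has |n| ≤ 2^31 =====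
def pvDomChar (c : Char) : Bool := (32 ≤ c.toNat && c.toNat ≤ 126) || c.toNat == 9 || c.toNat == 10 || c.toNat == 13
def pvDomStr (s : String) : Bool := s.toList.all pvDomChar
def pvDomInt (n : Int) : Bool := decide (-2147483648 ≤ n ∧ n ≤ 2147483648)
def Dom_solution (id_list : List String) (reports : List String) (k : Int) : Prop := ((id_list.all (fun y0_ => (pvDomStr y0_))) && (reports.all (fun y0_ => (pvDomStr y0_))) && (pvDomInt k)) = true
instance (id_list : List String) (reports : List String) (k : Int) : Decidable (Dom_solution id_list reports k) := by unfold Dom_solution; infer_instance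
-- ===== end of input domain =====

-- B replaces A's two dicts (reportee → set of reporters, reporter → mail list) by one deduplicated
-- set of (reporter, reportee) pairs and counts over it directly (objective: simpler).


-- ===== PORT A =====
-- "reporter, reportee = report.split(' ')": exact when the split has exactly two parts (Pre_ guarantees it)
def pvParse (r : String) : String × String :=
  let parts := (PySem.Str.split? r " ").getD []
  (parts.getD 0 "", parts.getD 1 "")

def solution (id_list : List String) (reports : List String) (k : Int) : List Int :=
  let reported0 : PySem.Dict String (PySem.Set String) :=
    id_list.foldl (fun d u => d.insert u PySem.Set.empty) PySem.Dict.empty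
  let mail0 : PySem.Dict String (List String) :=
    id_list.foldl (fun d u => d.insert u []) PySem.Dict.empty
  -- KeyError on a reportee outside id_list is excluded by Pre_ (modify then hits an existing key)
  let reported := reports.foldl (fun d r =>
    let p := pvParse r
    d.modify p.2 PySem.Set.empty (fun s => s.add p.1)) reported0
  let mail := reported.items.foldl (fun m it =>
    if PySem.Set.len it.2 < k then m
    else it.2.foldl (fun m rp => m.modify rp [] (fun l => l ++ [it.1])) m) mail0
  mail.values.map (fun l => (l.length : Int))

-- ===== PORT B =====
def solution_alt (id_list : List String) (reports : List String) (k : Int) : List Int :=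
  let pairs : PySem.Set (String × String) := PySem.Set.ofList (reports.map pvParse)
  let banned : PySem.Set String :=
    PySem.Set.ofList ((pairs.filter (fun q =>
      k ≤ ((pairs.countP (fun p => p.2 == q.2)) : Int))).map (fun q => q.2))
  (PySem.List.dedup id_list).map (fun u =>
    ((pairs.countP (fun p => p.1 == u && banned.contains p.2)) : Int))

-- ===== PRECONDITION & SPEC =====
-- the reporters (with multiplicity) that reported c
def pvReporters (reports : List String) (c : String) : List String :=
  ((reports.map pvParse).filter (fun p => p.2 == c)).map (fun p => p.1)

-- Pre_ excludes exactly the inputs on which A raises: a report that does not split into exactly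
-- two words (ValueError), a reportee outside id_list, or a reporter of a banned reportee outside
-- id_list (KeyError).
def Pre_solution (id_list : List String) (reports : List String) (k : Int) : Prop :=
  (∀ r ∈ reports, ((PySem.Str.split? r " ").getD []).length = 2) ∧
  (∀ r ∈ reports, (pvParse r).2 ∈ id_list) ∧
  (∀ r ∈ reports, k ≤ ((PySem.Set.ofList (pvReporters reports (pvParse r).2)).length : Int) →
    (pvParse r).1 ∈ id_list)
instance (id_list : List String) (reports : List String) (k : Int) : Decidable (Pre_solution id_list reports k) := by unfold Pre_solution; infer_instance

def pvWitness_solution : List String × List String × Int :=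
  (["muzi", "frodo", "apeach"], ["muzi frodo", "apeach frodo", "muzi frodo"], 2)

def Spec_solution (id_list : List String) (reports : List String) (k : Int) (out : List Int) : Prop := out = solution_alt id_list reports k
instance (id_list : List String) (reports : List String) (k : Int) (out : List Int) : Decidable (Spec_solution id_list reports k out) := by unfold Spec_solution; infer_instance

-- ===== CLAIM (what is proved, stated in full; the proofs are below) =====
def Claim_equal_solution : Prop := ∀ (id_list : List String) (reports : List String) (k : Int), Dom_solution id_list reports k → Pre_solution id_list reports k → Spec_solution id_list reports k (solution id_list reports k)


-- ===== LEMMAS AND PROOFS =====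

-- the set of distinct reporters of c: A's reported_by_id[c], B's distinct pairs with second component c
def pvS (reports : List String) (c : String) : PySem.Set String :=
  PySem.Set.ofList (pvReporters reports c)

lemma getD_foldl_insert_const {ν : Type} (l : List String) (v0 : ν) (d : PySem.Dict String ν)
    (c : String) (dflt : ν) :
    (l.foldl (fun d u => d.insert u v0) d).getD c dflt
      = if c ∈ l then v0 else d.getD c dflt := by
  induction l generalizing d with
  | nil => simp
  | cons x xs ih =>
    rw [List.foldl_cons, ih]
    by_cases hx : c ∈ xs <;> by_cases he : c = x <;>
      simp [hx, he, PySem.Dict.getD_insert]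

lemma getD_foldl_modify_add (l : List (String × String)) (d : PySem.Dict String (PySem.Set String))
    (c : String) :
    (l.foldl (fun d p => d.modify p.2 PySem.Set.empty (fun s => s.add p.1)) d).getD c PySem.Set.empty
      = ((l.filter (fun p => p.2 == c)).map (fun p => p.1)).foldl PySem.Set.add
          (d.getD c PySem.Set.empty) := by
  induction l generalizing d with
  | nil => simp
  | cons p ps ih =>
    rw [List.foldl_cons, ih, List.filter_cons]
    by_cases he : p.2 = c
    · simp [he]
    · have hb : (p.2 == c) = false := by simp [he]
      have h2 : ¬ c = p.2 := fun hh => he hh.symm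
      simp [hb, PySem.Dict.getD_modify, h2]

lemma set_update_of_forall_mem {α : Type} [BEq α] [LawfulBEq α] (xs : List α) (s : PySem.Set α)
    (h : ∀ x ∈ xs, x ∈ s) : PySem.Set.update s xs = s := by
  induction xs generalizing s with
  | nil => exact PySem.Set.update_nil s
  | cons x xs ih =>
    rw [PySem.Set.update_cons, PySem.Set.add_of_mem (h x (List.mem_cons_self))]
    exact ih s (fun y hy => h y (List.mem_cons_of_mem _ hy))

lemma getD_foldl_modify_append_const (xs : List String) (c : String)
    (m : PySem.Dict String (List String)) (u : String) :
    (xs.foldl (fun m rp => m.modify rp [] (fun l => l ++ [c])) m).getD u []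
      = m.getD u [] ++ (xs.filter (fun rp => rp == u)).map (fun _ => c) := by
  induction xs generalizing m with
  | nil => simp
  | cons x xs ih =>
    rw [List.foldl_cons, ih, List.filter_cons]
    by_cases he : x = u
    · simp [he]
    · have hb : (x == u) = false := by simp [he]
      have h2 : ¬ u = x := fun hh => he hh.symm
      simp [hb, PySem.Dict.getD_modify, h2]

lemma filter_beq_of_nodup {xs : List String} (h : xs.Nodup) (u : String) :
    xs.filter (fun rp => rp == u) = if u ∈ xs then [u] else [] := by
  induction xs with
  | nil => simp
  | cons x xs ih =>
    rw [List.filter_cons]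
    by_cases he : x = u
    · subst he
      have : x ∉ xs := (List.nodup_cons.mp h).1
      simp [this, ih (List.nodup_cons.mp h).2]
    · have hb : (x == u) = false := by simp [he]
      have h2 : ¬ (u = x) := fun hh => he hh.symm
      simp [hb, ih (List.nodup_cons.mp h).2, h2]

lemma mail_fold_getD (S : String → PySem.Set String) (k : Int) (L : List String)
    (m : PySem.Dict String (List String)) (u : String) (hS : ∀ c, (S c).Nodup) :
    ((L.foldl (fun m c => if PySem.Set.len (S c) < k then m
        else (S c).foldl (fun m rp => m.modify rp [] (fun l => l ++ [c])) m) m).getD u [])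
      = m.getD u []
        ++ (L.filter (fun c => (!decide (PySem.Set.len (S c) < k)) && (S c).contains u)).map
            (fun c => c) := by
  induction L generalizing m with
  | nil => simp
  | cons c L ih =>
    rw [List.foldl_cons, List.filter_cons]
    by_cases hc : PySem.Set.len (S c) < k
    · simp only [hc, if_pos, decide_true, Bool.not_true, Bool.false_and, ih, Bool.false_eq_true,
        if_false]
    · simp only [hc, if_neg, not_false_iff, decide_false, Bool.not_false, Bool.true_and]
      rw [ih, getD_foldl_modify_append_const, filter_beq_of_nodup (hS c)]
      by_cases hu : u ∈ S c
      · simp [hu, List.append_assoc]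
      · simp [hu]

lemma mail_fold_keys (S : String → PySem.Set String) (k : Int) (L : List String)
    (m : PySem.Dict String (List String))
    (h : ∀ c ∈ L, ¬ PySem.Set.len (S c) < k → ∀ rp ∈ S c, rp ∈ m.keys) :
    (L.foldl (fun m c => if PySem.Set.len (S c) < k then m
        else (S c).foldl (fun m rp => m.modify rp [] (fun l => l ++ [c])) m) m).keys = m.keys := by
  induction L generalizing m with
  | nil => rfl
  | cons c L ih =>
    rw [List.foldl_cons]
    by_cases hc : PySem.Set.len (S c) < k
    · rw [if_pos hc]
      exact ih m (fun c' hc' => h c' (List.mem_cons_of_mem _ hc'))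
    · rw [if_neg hc]
      have hkeys : ((S c).foldl (fun m rp => m.modify rp [] (fun l => l ++ [c])) m).keys
          = m.keys := by
        have := PySem.Dict.keys_foldl_modify (S c) [] (fun _ _ v => v ++ [c]) m
        rw [this]
        exact set_update_of_forall_mem _ _ (h c (List.mem_cons_self) hc)
      rw [ih _ ?_, hkeys]
      intro c' hc' hkc' rp hrp
      rw [hkeys]
      exact h c' (List.mem_cons_of_mem _ hc') hkc' rp hrp

lemma mem_map_fst_filter_snd (l : List (String × String)) (c r : String) :
    r ∈ (l.filter (fun p => p.2 == c)).map (fun p => p.1) ↔ (r, c) ∈ l := by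
  simp only [List.mem_map, List.mem_filter, beq_iff_eq]
  constructor
  · rintro ⟨⟨a, b⟩, ⟨hp, hb⟩, ha⟩
    simp only at hb ha
    subst hb; subst ha; exact hp
  · intro h; exact ⟨(r, c), ⟨h, rfl⟩, rfl⟩

lemma mem_map_snd_filter (l : List (String × String)) (q : String → Bool) (u c : String) :
    c ∈ (l.filter (fun p => p.1 == u && q p.2)).map (fun p => p.2) ↔ ((u, c) ∈ l ∧ q c = true) := by
  simp only [List.mem_map, List.mem_filter, Bool.and_eq_true, beq_iff_eq]
  constructor
  · rintro ⟨⟨a, b⟩, ⟨hp, ha, hq⟩, hb⟩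
    simp only at ha hq hb
    subst ha; subst hb; exact ⟨hp, hq⟩
  · rintro ⟨h, hq⟩; exact ⟨(u, c), ⟨h, rfl, hq⟩, rfl⟩

lemma length_eq_of_nodup_mem_iff {α : Type} [DecidableEq α] (l1 l2 : List α)
    (h1 : l1.Nodup) (h2 : l2.Nodup) (h : ∀ x, x ∈ l1 ↔ x ∈ l2) : l1.length = l2.length := by
  rw [← List.toFinset_card_of_nodup h1, ← List.toFinset_card_of_nodup h2]
  congr 1
  exact Finset.ext (by simp [h])

lemma mem_pvS (reports : List String) (c u : String) :
    u ∈ pvS reports c ↔ (u, c) ∈ reports.map pvParse := by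
  rw [pvS, PySem.Set.mem_ofList, pvReporters, mem_map_fst_filter_snd]

-- A's result, characterised: one count per id u of the ids c that are banned and were reported by u
lemma solutionA_char (id_list reports : List String) (k : Int)
    (h3 : ∀ r ∈ reports, (pvParse r).2 ∈ id_list)
    (h4 : ∀ r ∈ reports,
      k ≤ ((PySem.Set.ofList (pvReporters reports (pvParse r).2)).length : Int) →
      (pvParse r).1 ∈ id_list) :
    solution id_list reports k = (PySem.List.dedup id_list).map (fun u =>
      ((((PySem.List.dedup id_list).filter (fun c => (!decide (PySem.Set.len (pvS reports c) < k))
          && (pvS reports c).contains u)).length : Nat) : Int)) := by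
  have e1 : solution id_list reports k =
      (((reports.foldl (fun d r => d.modify (pvParse r).2 PySem.Set.empty
            (fun s => s.add (pvParse r).1))
          (id_list.foldl (fun d u => d.insert u PySem.Set.empty) PySem.Dict.empty)).items.foldl
        (fun m it => if PySem.Set.len it.2 < k then m
          else it.2.foldl (fun m rp => m.modify rp [] (fun l => l ++ [it.1])) m)
        (id_list.foldl (fun d u => d.insert u ([] : List String)) PySem.Dict.empty)).values.map
          (fun l => (l.length : Int))) := rfl
  rw [e1]
  have hnd : (PySem.List.dedup id_list).Nodup := PySem.List.nodup_dedup _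
  set reported0 := id_list.foldl (fun d u => d.insert u PySem.Set.empty) PySem.Dict.empty with hrep0
  set mail0 := id_list.foldl (fun d u => d.insert u ([] : List String)) PySem.Dict.empty with hm0
  set reported := reports.foldl (fun d r => d.modify (pvParse r).2 PySem.Set.empty
      (fun s => s.add (pvParse r).1)) reported0 with hrep
  -- reported's lookups
  have hrep_getD : ∀ c, reported.getD c PySem.Set.empty = pvS reports c := by
    intro c
    have hmap : reported = (reports.map pvParse).foldl
        (fun d p => d.modify p.2 PySem.Set.empty (fun s => s.add p.1)) reported0 := by
      rw [hrep, List.foldl_map]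
    rw [hmap, getD_foldl_modify_add]
    have hbase : reported0.getD c PySem.Set.empty = PySem.Set.empty := by
      rw [hrep0, getD_foldl_insert_const]
      simp [PySem.Dict.getD_empty]
    rw [hbase, pvS, pvReporters, PySem.Set.ofList_eq_foldl]
    rfl
  -- reported's keys
  have hrep0_keys : reported0.keys = PySem.List.dedup id_list := by
    rw [hrep0, PySem.Dict.keys_foldl_insert, PySem.Dict.keys_empty, PySem.Set.update_nil_left,
      ← PySem.List.dedup_eq_ofList]
  have hrep_keys : reported.keys = PySem.List.dedup id_list := by
    rw [hrep, PySem.Dict.keys_foldl_modify_key reports (fun r => (pvParse r).2) PySem.Set.empty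
      (fun _ r s => s.add (pvParse r).1) reported0, hrep0_keys]
    apply set_update_of_forall_mem
    intro x hx
    obtain ⟨r, hr, hrx⟩ := List.mem_map.mp hx
    exact (PySem.List.mem_dedup _ _).mpr (hrx ▸ h3 r hr)
  have hitems : reported.items = (PySem.List.dedup id_list).map (fun c => (c, pvS reports c)) := by
    rw [PySem.Dict.items_eq_map_keys reported (hrep_keys ▸ hnd) PySem.Set.empty, hrep_keys]
    exact List.map_congr_left (fun c _ => by rw [hrep_getD])
  rw [hitems, List.foldl_map]
  set mail := (PySem.List.dedup id_list).foldl (fun m c => if PySem.Set.len (pvS reports c) < k then m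
      else (pvS reports c).foldl (fun m rp => m.modify rp [] (fun l => l ++ [c])) m) mail0
    with hmail
  have hm0_keys : mail0.keys = PySem.List.dedup id_list := by
    rw [hm0, PySem.Dict.keys_foldl_insert, PySem.Dict.keys_empty, PySem.Set.update_nil_left,
      ← PySem.List.dedup_eq_ofList]
  have hmail_keys : mail.keys = PySem.List.dedup id_list := by
    rw [hmail, mail_fold_keys, hm0_keys]
    intro c _ hkc rp hrp
    rw [hm0_keys]
    obtain ⟨r, hr, hparse⟩ := List.mem_map.mp ((mem_pvS reports c rp).mp hrp)
    have hk2 : k ≤ ((PySem.Set.ofList (pvReporters reports (pvParse r).2)).length : Int) := by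
      rw [hparse]
      have := not_lt.mp hkc
      simpa [PySem.Set.len, pvS] using this
    have := h4 r hr hk2
    rw [hparse] at this
    exact (PySem.List.mem_dedup _ _).mpr this
  have hvals : mail.values = (PySem.List.dedup id_list).map (fun u => mail.getD u []) := by
    rw [PySem.Dict.values_eq_map_keys mail (hmail_keys ▸ hnd) [], hmail_keys]
  rw [hvals, List.map_map]
  apply List.map_congr_left
  intro u _
  have hgd : mail.getD u [] = mail0.getD u []
      ++ ((PySem.List.dedup id_list).filter (fun c => (!decide (PySem.Set.len (pvS reports c) < k))
          && (pvS reports c).contains u)).map (fun c => c) := by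
    rw [hmail, mail_fold_getD]
    intro c
    exact PySem.Set.nodup_ofList _
  have hm0_getD : mail0.getD u [] = [] := by
    rw [hm0, getD_foldl_insert_const]
    simp [PySem.Dict.getD_empty]
  simp [hgd, hm0_getD]

-- the per-id count of B equals the per-id count of A
lemma count_eq (id_list reports : List String) (k : Int)
    (h3 : ∀ r ∈ reports, (pvParse r).2 ∈ id_list) (u : String) :
    ((PySem.List.dedup id_list).filter (fun c => (!decide (PySem.Set.len (pvS reports c) < k))
        && (pvS reports c).contains u)).length
      = (PySem.Set.ofList (reports.map pvParse)).countP (fun p => p.1 == u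
          && (PySem.Set.ofList (((PySem.Set.ofList (reports.map pvParse)).filter (fun q =>
                k ≤ (((PySem.Set.ofList (reports.map pvParse)).countP
                    (fun p => p.2 == q.2)) : Int))).map (fun q => q.2))).contains p.2) := by
  set D := PySem.Set.ofList (reports.map pvParse) with hD
  have hDnodup : D.Nodup := PySem.Set.nodup_ofList _
  have hmemD : ∀ r c, (r, c) ∈ D ↔ r ∈ pvS reports c := by
    intro r c
    rw [hD, PySem.Set.mem_ofList, mem_pvS]
  -- distinct-pair count with second component c = number of distinct reporters of c
  have hcount : ∀ c, D.countP (fun p => p.2 == c) = (pvS reports c).length := by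
    intro c
    have hlen : ((D.filter (fun p => p.2 == c)).map (fun p => p.1)).length
        = (pvS reports c).length := by
      apply length_eq_of_nodup_mem_iff
      · apply List.Nodup.map_on
        · rintro ⟨a, b⟩ hx ⟨a', b'⟩ hy hf
          have hb : b = c := by simpa using (List.mem_filter.mp hx).2
          have hb' : b' = c := by simpa using (List.mem_filter.mp hy).2
          simp only at hf
          simp [hf, hb, hb']
        · exact hDnodup.filter _
      · exact PySem.Set.nodup_ofList _
      · intro x
        rw [mem_map_fst_filter_snd, hmemD]
    rw [List.countP_eq_length_filter, ← hlen, List.length_map]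
  -- the banned test, rewritten to a closed predicate on p.2
  have hbanned : ∀ p ∈ D, (PySem.Set.ofList ((D.filter (fun q =>
        k ≤ ((D.countP (fun p => p.2 == q.2)) : Int))).map (fun q => q.2))).contains p.2
      = decide (k ≤ (((pvS reports p.2).length : Nat) : Int)) := by
    intro p hp
    rw [Bool.eq_iff_iff, PySem.Set.contains_iff, PySem.Set.mem_ofList, decide_eq_true_iff]
    constructor
    · intro hmem
      obtain ⟨q, hq, hqe⟩ := List.mem_map.mp hmem
      have := (List.mem_filter.mp hq).2
      rw [decide_eq_true_iff, hcount] at this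
      rwa [hqe] at this
    · intro hle
      apply List.mem_map.mpr
      exact ⟨p, List.mem_filter.mpr ⟨hp, by rw [decide_eq_true_iff, hcount]; exact hle⟩, rfl⟩
  rw [List.countP_congr (fun p hp => by rw [hbanned p hp])]
  -- both sides are lengths of nodup lists with the same members
  have hlen2 : ((D.filter (fun p => p.1 == u
      && decide (k ≤ (((pvS reports p.2).length : Nat) : Int)))).map (fun p => p.2)).length
      = ((PySem.List.dedup id_list).filter (fun c => (!decide (PySem.Set.len (pvS reports c) < k))
          && (pvS reports c).contains u)).length := by
    apply length_eq_of_nodup_mem_iff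
    · apply List.Nodup.map_on
      · rintro ⟨a, b⟩ hx ⟨a', b'⟩ hy hf
        have ha : a = u := by
          have := (List.mem_filter.mp hx).2
          simp only [Bool.and_eq_true, beq_iff_eq] at this
          exact this.1
        have ha' : a' = u := by
          have := (List.mem_filter.mp hy).2
          simp only [Bool.and_eq_true, beq_iff_eq] at this
          exact this.1
        simp only at hf
        simp [hf, ha, ha']
      · exact hDnodup.filter _
    · exact (PySem.List.nodup_dedup id_list).filter _
    · intro c
      rw [mem_map_snd_filter D (fun s => decide (k ≤ (((pvS reports s).length : Nat) : Int))) u c]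
      rw [List.mem_filter, hmemD]
      constructor
      · rintro ⟨hmem, hq⟩
        rw [decide_eq_true_iff] at hq
        have hcid : c ∈ PySem.List.dedup id_list := by
          obtain ⟨r, hr, hparse⟩ := List.mem_map.mp ((mem_pvS reports c u).mp hmem)
          have := h3 r hr
          rw [hparse] at this
          exact (PySem.List.mem_dedup _ _).mpr this
        refine ⟨hcid, ?_⟩
        simp only [Bool.and_eq_true, Bool.not_eq_eq_eq_not, Bool.not_true, decide_eq_false_iff_not,
          not_lt, PySem.Set.contains_iff]
        exact ⟨by simpa [PySem.Set.len] using hq, hmem⟩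
      · rintro ⟨hcid, hpred⟩
        simp only [Bool.and_eq_true, Bool.not_eq_eq_eq_not, Bool.not_true, decide_eq_false_iff_not,
          not_lt, PySem.Set.contains_iff] at hpred
        refine ⟨hpred.2, ?_⟩
        rw [decide_eq_true_iff]
        simpa [PySem.Set.len] using hpred.1
  rw [List.countP_eq_length_filter, ← hlen2, List.length_map]

-- ===== VERDICT (by name: the statement is the Claim_ definition above) =====
theorem solution_spec : Claim_equal_solution := by
  intro id_list reports k _ hpre
  obtain ⟨_, h3, h4⟩ := hpre
  unfold Spec_solution
  rw [solutionA_char id_list reports k h3 h4]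
  have hB : solution_alt id_list reports k = (PySem.List.dedup id_list).map (fun u =>
      (((PySem.Set.ofList (reports.map pvParse)).countP (fun p => p.1 == u
          && (PySem.Set.ofList (((PySem.Set.ofList (reports.map pvParse)).filter (fun q =>
                k ≤ (((PySem.Set.ofList (reports.map pvParse)).countP
                    (fun p => p.2 == q.2)) : Int))).map (fun q => q.2))).contains p.2)) : Int)) :=
    rfl
  rw [hB]
  apply List.map_congr_left
  intro u _
  rw [count_eq id_list reports k h3 u]
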